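-- pv_equiv track=rewrite | github.com/diffarydk/prediction | prediction/components/pattern_analyzer.py | _check_repeating_subsequences
-- ===== SOURCE A (Python) =====
-- from typing import Dict, List, Any, Optional, Union, Tuple
--
-- def _check_repeating_subsequences(sequence: List[int], min_length: int = 2) -> bool:
--     """
--     Check for repeating subsequences in the sequence.
--
--     Args:
--         sequence: Game outcome sequence
--         min_length: Minimum subsequence length to consider
--
--     Returns:
--         bool: True if repeating subsequences found
--     """
--     seq_length = len(sequence)
--
--     # Check for subsequences of different lengths
--     for length in range(min_length, seq_length // 2 + 1):
--         for i in range(seq_length - length * 2 + 1):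
--             subsequence = tuple(sequence[i:i+length])
--
--             # Look for this subsequence elsewhere
--             for j in range(i + length, seq_length - length + 1):
--                 if tuple(sequence[j:j+length]) == subsequence:
--                     return True
--
--     return False
-- ===== SOURCE B (Python) =====
-- def _intern(xs):
--     """Replace each element by the index of its first occurrence (an id that is
--     equal for two positions iff the elements are equal)."""
--     d = {}
--     sd = d.setdefault
--     return [sd(x, i) for i, x in enumerate(xs)]
--
--
-- def _check_repeating_subsequences(sequence, min_length=2):
--     """Rank-doubling detection of a disjoint repeated window of length min_length
--     (a repeat of any length >= min_length contains one of length exactly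
--     min_length, and vice versa).  For lengths below 1 the empty subsequence
--     trivially repeats."""
--     if min_length <= 0:
--         return True
--     m = min_length
--     n = len(sequence)
--     if 2 * m > n:
--         return False  # no room for two disjoint windows
--     # r[i] = id of the window of length k starting at i; ids equal iff windows equal
--     r = _intern(sequence)
--     k = 1
--     while 2 * k <= m:
--         if len(set(r)) == len(r):
--             return False  # no window of length k repeats at all, so none of length m
--         r = _intern(list(zip(r, r[k:])))
--         k *= 2
--     # id pair for the window of length m: ids of its length-k prefix and suffix
--     keys = list(zip(r, r[m - k:]))
--     first = {}
--     for j, key in enumerate(keys):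
--         i = first.setdefault(key, j)
--         if j - i >= m:
--             return True
--     return False
-- ===== Notes on version B (the rewrite author's own statement) =====
-- stated objective: alternative
-- what changed: Replaced A's triple nested loop over every pattern length, start and probe position by rank doubling: windows of length min_length get integer ids via repeated first-occurrence interning of id pairs (with an early exit when no window repeats at all), then a single hash pass over the ids finds a window that reappears at distance >= min_length (a repeat of any longer length always contains one of length min_length).
import Mathlib
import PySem

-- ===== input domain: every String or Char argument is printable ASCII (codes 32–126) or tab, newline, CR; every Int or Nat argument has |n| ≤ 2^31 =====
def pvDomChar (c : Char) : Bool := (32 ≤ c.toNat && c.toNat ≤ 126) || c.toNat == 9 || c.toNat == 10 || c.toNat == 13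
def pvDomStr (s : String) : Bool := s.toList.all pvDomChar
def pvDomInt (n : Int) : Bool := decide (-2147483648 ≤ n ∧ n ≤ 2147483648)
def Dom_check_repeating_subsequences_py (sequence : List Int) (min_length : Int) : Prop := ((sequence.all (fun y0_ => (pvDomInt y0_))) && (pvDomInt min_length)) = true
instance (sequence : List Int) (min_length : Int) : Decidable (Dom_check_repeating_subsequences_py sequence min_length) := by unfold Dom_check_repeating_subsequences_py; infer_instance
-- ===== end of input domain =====

-- B replaces A's scan over every pattern length, start and probe position by rank doubling:
-- windows of length min_length get integer ids, then one hash pass finds a disjoint repeat.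

-- ===== PORT A =====
-- 'for k in range(a, b): if f(k): return True' as an early-exit loop (fuel = number of iterations)
def pvForAny (f : Int → Bool) (a : Int) : Nat → Bool
  | 0 => false
  | t + 1 => if f a then true else pvForAny f (a + 1) t

def check_repeating_subsequences_py (sequence : List Int) (min_length : Int) : Bool :=
  let seq_length : Int := sequence.length
  -- for length in range(min_length, seq_length // 2 + 1):
  pvForAny (fun length =>
    -- for i in range(seq_length - length * 2 + 1):
    pvForAny (fun i =>
      let subsequence := PySem.List.slice sequence (some i) (some (i + length))
      -- for j in range(i + length, seq_length - length + 1): if … : return True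
      pvForAny (fun j =>
          PySem.List.slice sequence (some j) (some (j + length)) == subsequence)
        (i + length) ((seq_length - length + 1 - (i + length)).toNat))
      0 ((seq_length - length * 2 + 1 - 0).toNat))
    min_length ((PySem.Int.floordiv seq_length 2 + 1 - min_length).toNat)

-- ===== PORT B =====
-- _intern: '[d.setdefault(x, i) for i, x in enumerate(xs)]' (first-occurrence ids)
def pvInternLoop {κ : Type} [BEq κ] (d : PySem.Dict κ Int) (i : Int) : List κ → List Int
  | [] => []
  | x :: rest =>
      match d.get? x with
      | some v => v :: pvInternLoop d (i + 1) rest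
      | none => i :: pvInternLoop (d.insert x i) (i + 1) rest

def pvIntern {κ : Type} [BEq κ] (xs : List κ) : List Int :=
  pvInternLoop PySem.Dict.empty 0 xs

-- 'while 2 * k <= m: if len(set(r)) == len(r): return False; r = _intern(list(zip(r, r[k:]))); k *= 2'
-- (the '1 ≤ k' conjunct only makes the recursion total; the loop is entered with k = 1 and doubles k)
def pvDouble (m : Int) (k : Int) (r : List Int) : Option (Int × List Int) :=
  if h : 1 ≤ k ∧ 2 * k ≤ m then
    if (PySem.Set.ofList r).length = r.length then none
    else pvDouble m (2 * k) (pvIntern (r.zip (r.drop k.toNat)))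
  else some (k, r)
termination_by (m - k).toNat
decreasing_by omega

-- 'for j, key in enumerate(keys): i = first.setdefault(key, j); if j - i >= m: return True'
def pvAltLoop (m : Int) : PySem.Dict (Int × Int) Int → List (Int × (Int × Int)) → Bool
  | _, [] => false
  | first, (j, key) :: rest =>
      match first.get? key with
      | some i => if m ≤ j - i then true else pvAltLoop m first rest
      | none => if m ≤ j - j then true else pvAltLoop m (first.insert key j) rest

def check_repeating_subsequences_py_alt (sequence : List Int) (min_length : Int) : Bool :=
  if min_length ≤ 0 then true
  else
    let n : Int := sequence.length
    if n < 2 * min_length then false  -- no room for two disjoint windows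
    else
      match pvDouble min_length 1 (pvIntern sequence) with
      | none => false
      | some kr =>
          let keys := kr.2.zip (kr.2.drop (min_length - kr.1).toNat)
          pvAltLoop min_length PySem.Dict.empty (PySem.List.enumerate keys 0)

-- ===== PRECONDITION & SPEC =====
def Spec_check_repeating_subsequences_py (sequence : List Int) (min_length : Int) (out : Bool) : Prop := out = check_repeating_subsequences_py_alt sequence min_length
instance (sequence : List Int) (min_length : Int) (out : Bool) : Decidable (Spec_check_repeating_subsequences_py sequence min_length out) := by unfold Spec_check_repeating_subsequences_py; infer_instance

-- ===== CLAIM (what is proved, stated in full; the proofs are below) =====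
def Claim_equal_check_repeating_subsequences_py : Prop := ∀ (sequence : List Int) (min_length : Int), Dom_check_repeating_subsequences_py sequence min_length → Spec_check_repeating_subsequences_py sequence min_length (check_repeating_subsequences_py sequence min_length)

-- ===== LEMMAS AND PROOFS =====

-- the early-exit loop is range(a, b)'s any
lemma pvForAny_eq (f : Int → Bool) (a b : Int) :
    pvForAny f a ((b - a).toNat) = (PySem.List.pyRange a b 1).any f := by
  generalize ht : (b - a).toNat = t
  induction t generalizing a with
  | zero =>
      rw [PySem.List.pyRange_one_eq_nil (by omega)]
      simp [pvForAny]
  | succ t ih =>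
      rw [PySem.List.pyRange_one_cons (by omega : a < b)]
      simp only [pvForAny, List.any_cons]
      cases hfa : f a
      · simpa [hfa] using ih (a + 1) (by omega)
      · simp

-- A as nested anys over the ranges
lemma pvA_as_any (s : List Int) (m : Int) :
    check_repeating_subsequences_py s m =
      (PySem.List.pyRange m (PySem.Int.floordiv (s.length : Int) 2 + 1) 1).any (fun length =>
        (PySem.List.pyRange 0 ((s.length : Int) - length * 2 + 1) 1).any (fun i =>
          (PySem.List.pyRange (i + length) ((s.length : Int) - length + 1) 1).any (fun j =>
            PySem.List.slice s (some j) (some (j + length))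
              == PySem.List.slice s (some i) (some (i + length))))) := by
  unfold check_repeating_subsequences_py
  simp only [pvForAny_eq]

-- the window of length M starting at k
def pvWin (s : List Int) (M k : Nat) : List Int := (s.drop k).take M

-- "some window of length M repeats at a disjoint later position"
def pvRep (s : List Int) (M : Nat) : Prop :=
  ∃ i j : Nat, i + M ≤ j ∧ j + M ≤ s.length ∧ pvWin s M i = pvWin s M j

-- the Int-indexed window as both ports slice it
lemma pvSlice_eq_win (s : List Int) (m i : Int) (hm : 0 ≤ m) (hi : 0 ≤ i) :
    PySem.List.slice s (some i) (some (i + m)) = pvWin s m.toNat i.toNat := by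
  rw [PySem.List.slice_toNat s hi (by omega : (0:Int) ≤ i + m)]
  unfold pvWin
  congr 1
  omega

lemma pvWin_prefix (s : List Int) (M L k : Nat) (h : M ≤ L) :
    pvWin s M k = (pvWin s L k).take M := by
  simp [pvWin, List.take_take, Nat.min_eq_left h]

-- ===== A-side characterisation =====

lemma pvA_trivial (s : List Int) (m : Int) (hm : m ≤ 0) :
    check_repeating_subsequences_py s m = true := by
  rw [pvA_as_any]
  simp only [List.any_eq_true]
  refine ⟨0, ?_, 0, ?_, 0, ?_, ?_⟩
  · rw [PySem.List.mem_pyRange_one]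
    have h2 : PySem.Int.floordiv (s.length : Int) 2 = ((s.length / 2 : Nat) : Int) :=
      PySem.Int.floordiv_natCast s.length 2
    omega
  · rw [PySem.List.mem_pyRange_one]; omega
  · rw [PySem.List.mem_pyRange_one]; omega
  · simp

lemma pvA_iff (s : List Int) (m : Int) (hm : 1 ≤ m) :
    check_repeating_subsequences_py s m = true ↔ pvRep s m.toNat := by
  rw [pvA_as_any]
  simp only [List.any_eq_true, PySem.List.mem_pyRange_one, beq_iff_eq]
  constructor
  · rintro ⟨L, ⟨hmL, hLle⟩, i, ⟨hi0, hiup⟩, j, ⟨hij, hjup⟩, heq⟩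
    have hfd : PySem.Int.floordiv (s.length : Int) 2 = ((s.length / 2 : Nat) : Int) :=
      PySem.Int.floordiv_natCast s.length 2
    have hL1 : (1 : Int) ≤ L := le_trans hm hmL
    have hj0 : (0 : Int) ≤ j := by omega
    rw [pvSlice_eq_win s L i (by omega) hi0, pvSlice_eq_win s L j (by omega) hj0] at heq
    refine ⟨i.toNat, j.toNat, by omega, by omega, ?_⟩
    rw [pvWin_prefix s m.toNat L.toNat i.toNat (by omega),
        pvWin_prefix s m.toNat L.toNat j.toNat (by omega), heq]
  · rintro ⟨i, j, hij, hjn, heq⟩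
    have hfd : PySem.Int.floordiv (s.length : Int) 2 = ((s.length / 2 : Nat) : Int) :=
      PySem.Int.floordiv_natCast s.length 2
    refine ⟨m, ⟨le_refl m, by omega⟩, (i : Int), ⟨by omega, by omega⟩,
      (j : Int), ⟨by omega, by omega⟩, ?_⟩
    rw [pvSlice_eq_win s m i (by omega) (by omega), pvSlice_eq_win s m j (by omega) (by omega)]
    simpa using heq.symm

-- ===== B-side: _intern stores first-occurrence indices =====

lemma pvInternLoop_spec {κ : Type} [BEq κ] [LawfulBEq κ] (full : List κ) :
    ∀ (rest pre : List κ) (d : PySem.Dict κ Int), full = pre ++ rest →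
    (∀ y, d.get? y = if y ∈ pre then some ((pre.idxOf y : Nat) : Int) else none) →
    pvInternLoop d (pre.length : Int) rest
      = rest.map (fun x => ((full.idxOf x : Nat) : Int)) := by
  intro rest
  induction rest with
  | nil => intro pre d _ _; rfl
  | cons x rest' ih =>
      intro pre d hfull hd
      have hfull' : full = (pre ++ [x]) ++ rest' := by
        rw [List.append_assoc, List.singleton_append]; exact hfull
      have hlen : (((pre ++ [x]).length : Nat) : Int) = (pre.length : Int) + 1 := by
        simp
      have hidx : full.idxOf x = if x ∈ pre then pre.idxOf x else pre.length := by
        rw [hfull, List.idxOf_append]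
        split_ifs with h
        · rfl
        · rw [List.idxOf_cons_self]
          omega
      by_cases hx : x ∈ pre
      · have hdx : d.get? x = some ((pre.idxOf x : Nat) : Int) := by
          rw [hd x, if_pos hx]
        have hd' : ∀ y, d.get? y
            = if y ∈ pre ++ [x] then some (((pre ++ [x]).idxOf y : Nat) : Int) else none := by
          intro y
          rw [hd y, List.idxOf_append]
          by_cases hy : y ∈ pre
          · rw [if_pos hy, if_pos (by simp [hy]), if_pos hy]
          · by_cases hyx : y = x
            · subst hyx
              rw [if_neg hy, if_pos (by simp)]
              exact absurd hx hy  -- x ∈ pre contradicts hy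
            · rw [if_neg hy, if_neg (by simp [hy, hyx])]
        have hrec := ih (pre ++ [x]) d hfull' hd'
        rw [hlen] at hrec
        simp only [pvInternLoop, hdx, List.map_cons]
        rw [hrec, hidx, if_pos hx]
      · have hdx : d.get? x = none := by rw [hd x, if_neg hx]
        have hd' : ∀ y, (d.insert x (pre.length : Int)).get? y
            = if y ∈ pre ++ [x] then some (((pre ++ [x]).idxOf y : Nat) : Int) else none := by
          intro y
          by_cases hyx : y = x
          · subst hyx
            rw [PySem.Dict.get?_insert_self, if_pos (by simp)]
            rw [List.idxOf_append, if_neg hx, List.idxOf_cons_self]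
            norm_num
          · rw [PySem.Dict.get?_insert_of_ne _ _ hyx, hd y]
            by_cases hy : y ∈ pre
            · rw [if_pos hy, if_pos (by simp [hy]), List.idxOf_append, if_pos hy]
            · rw [if_neg hy, if_neg (by simp [hy, hyx])]
        have hrec := ih (pre ++ [x]) (d.insert x (pre.length : Int)) hfull' hd'
        rw [hlen] at hrec
        simp only [pvInternLoop, hdx, List.map_cons]
        rw [hrec, hidx, if_neg hx]

lemma pvIntern_spec {κ : Type} [BEq κ] [LawfulBEq κ] (xs : List κ) :
    pvIntern xs = xs.map (fun x => ((xs.idxOf x : Nat) : Int)) := by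
  have := pvInternLoop_spec xs xs [] PySem.Dict.empty (by simp) (by simp)
  simpa [pvIntern] using this

lemma pvIntern_length {κ : Type} [BEq κ] [LawfulBEq κ] (xs : List κ) :
    (pvIntern xs).length = xs.length := by
  rw [pvIntern_spec]; simp

lemma pvIntern_get_iff {κ : Type} [BEq κ] [LawfulBEq κ] (xs : List κ) (i j : Nat)
    (hi : i < xs.length) (hj : j < xs.length) :
    (pvIntern xs)[i]'(by rw [pvIntern_length]; exact hi)
      = (pvIntern xs)[j]'(by rw [pvIntern_length]; exact hj) ↔ xs[i] = xs[j] := by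
  simp only [pvIntern_spec, List.getElem_map, Int.ofNat_inj]
  constructor
  · intro h
    have h1 : xs[xs.idxOf xs[i]]'(List.idxOf_lt_length_of_mem (xs.getElem_mem hi)) = xs[i] :=
      List.getElem_idxOf _
    have h2 : xs[xs.idxOf xs[j]]'(List.idxOf_lt_length_of_mem (xs.getElem_mem hj)) = xs[j] :=
      List.getElem_idxOf _
    rw [← h1, ← h2]
    congr 1
  · intro h; rw [h]

-- ===== B-side: windows and rank arrays =====

lemma pvWin_split (s : List Int) (K i : Nat) :
    pvWin s (K + K) i = pvWin s K i ++ pvWin s K (i + K) := by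
  simp [pvWin, List.take_add, List.drop_drop, Nat.add_comm]

lemma pvWin_double_iff (s : List Int) (K i j : Nat) :
    pvWin s (K + K) i = pvWin s (K + K) j ↔
      (pvWin s K i = pvWin s K j ∧ pvWin s K (i + K) = pvWin s K (j + K)) := by
  constructor
  · intro h
    constructor
    · have := congrArg (List.take K) h
      simpa [← pvWin_prefix s K (K + K) _ (by omega)] using this
    · have := congrArg (List.drop K) h
      simpa [pvWin, List.drop_take, List.drop_drop, Nat.add_comm] using this
  · rintro ⟨h1, h2⟩
    rw [pvWin_split, pvWin_split, h1, h2]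

-- overlap gluing: equal length-K prefixes and suffixes give equal length-M windows (K ≤ M ≤ 2K)
lemma pvGlue (s : List Int) (K M i j : Nat) (hKM : K ≤ M) (hM2K : M ≤ K + K)
    (h1 : pvWin s K i = pvWin s K j) (h2 : pvWin s K (i + (M - K)) = pvWin s K (j + (M - K))) :
    pvWin s M i = pvWin s M j := by
  have g1 : ∀ t : Nat, t < K → s[i + t]? = s[j + t]? := by
    intro t ht
    have := congrArg (fun l => l[t]?) h1
    simpa [pvWin, List.getElem?_take, ht, List.getElem?_drop] using this
  have g2 : ∀ t : Nat, t < K → s[i + (M - K) + t]? = s[j + (M - K) + t]? := by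
    intro t ht
    have := congrArg (fun l => l[t]?) h2
    simpa [pvWin, List.getElem?_take, ht, List.getElem?_drop] using this
  apply List.ext_getElem?
  intro t
  simp only [pvWin, List.getElem?_take, List.getElem?_drop]
  by_cases htM : t < M
  · rw [if_pos htM, if_pos htM]
    by_cases htK : t < K
    · exact g1 t htK
    · have hu : t - (M - K) < K := by omega
      have := g2 (t - (M - K)) hu
      rw [show i + (M - K) + (t - (M - K)) = i + t by omega,
          show j + (M - K) + (t - (M - K)) = j + t by omega] at this
      exact this
  · rw [if_neg htM, if_neg htM]

-- invariant: r is a rank array for the windows of length K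
def pvGood (s : List Int) (K : Nat) (r : List Int) : Prop :=
  r.length + K = s.length + 1 ∧
    ∀ i j : Nat, ∀ (hi : i < r.length) (hj : j < r.length),
      (r[i] = r[j] ↔ pvWin s K i = pvWin s K j)

lemma pvGood_base (s : List Int) : pvGood s 1 (pvIntern s) := by
  constructor
  · rw [pvIntern_length]
  · intro i j hi hj
    rw [pvIntern_length] at hi hj
    rw [pvIntern_get_iff s i j hi hj]
    have e1 : pvWin s 1 i = [s[i]] := by
      unfold pvWin
      simp [List.take_one, List.head?_drop, List.getElem?_eq_getElem hi]
    have e2 : pvWin s 1 j = [s[j]] := by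
      unfold pvWin
      simp [List.take_one, List.head?_drop, List.getElem?_eq_getElem hj]
    rw [e1, e2]
    simp

lemma pvGood_step (s : List Int) (K : Nat) (r : List Int) (hK : 1 ≤ K)
    (hKr : K ≤ r.length) (hg : pvGood s K r) :
    pvGood s (K + K) (pvIntern (r.zip (r.drop K))) := by
  obtain ⟨hlen, hiff⟩ := hg
  have hzlen : (r.zip (r.drop K)).length = r.length - K := by
    simp only [List.length_zip, List.length_drop]; omega
  constructor
  · rw [pvIntern_length, hzlen]; omega
  · intro i j hi hj
    rw [pvIntern_length, hzlen] at hi hj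
    rw [pvIntern_get_iff _ i j (by rw [hzlen]; exact hi) (by rw [hzlen]; exact hj)]
    rw [List.getElem_zip, List.getElem_zip, List.getElem_drop, List.getElem_drop,
        Prod.mk.injEq]
    rw [hiff i j (by omega) (by omega),
        hiff (K + i) (K + j) (by omega) (by omega)]
    rw [show K + i = i + K by omega, show K + j = j + K by omega]
    exact (pvWin_double_iff s K i j).symm

-- ===== B-side: len(set(r)) == len(r) means r has no duplicates =====

lemma pvSetFold_len {κ : Type} [BEq κ] [LawfulBEq κ] :
    ∀ (xs : List κ) (acc : PySem.Set κ),
      (xs.foldl PySem.Set.add acc).length ≤ acc.length + xs.length ∧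
      ((xs.foldl PySem.Set.add acc).length = acc.length + xs.length →
        xs.Nodup ∧ ∀ x ∈ xs, x ∉ acc) := by
  intro xs
  induction xs with
  | nil => intro acc; simp
  | cons x rest ih =>
      intro acc
      simp only [List.foldl_cons, List.length_cons]
      by_cases hx : x ∈ acc
      · have hadd : PySem.Set.add acc x = acc := by
          simp [PySem.Set.add, PySem.Set.contains, hx]
        rw [hadd]
        rcases ih acc with ⟨hle, _⟩
        exact ⟨by omega, by omega⟩
      · have hadd : PySem.Set.add acc x = acc ++ [x] := by
          simp [PySem.Set.add, PySem.Set.contains, hx]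
        rw [hadd]
        rcases ih (acc ++ [x]) with ⟨hle, heq⟩
        simp only [List.length_append, List.length_cons, List.length_nil] at hle heq
        refine ⟨by omega, ?_⟩
        intro h
        rcases heq (by omega) with ⟨hnd, hnin⟩
        have hxr : x ∉ rest := fun hmem => (hnin x hmem) (by simp)
        refine ⟨List.nodup_cons.mpr ⟨hxr, hnd⟩, ?_⟩
        intro y hy
        rcases List.mem_cons.mp hy with rfl | hy'
        · exact hx
        · intro hyacc; exact (hnin y hy') (by simp [hyacc])

lemma pvNodup_of_setlen {κ : Type} [BEq κ] [LawfulBEq κ] (xs : List κ)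
    (h : (PySem.Set.ofList xs).length = xs.length) : xs.Nodup := by
  have hfold : PySem.Set.ofList xs = xs.foldl PySem.Set.add PySem.Set.empty :=
    PySem.Set.ofList_eq_foldl xs
  rw [hfold] at h
  exact ((pvSetFold_len xs PySem.Set.empty).2 (by simpa [PySem.Set.empty] using h)).1

-- ===== B-side: the doubling loop =====

lemma pvDouble_spec (s : List Int) (m : Int) (hm2 : 2 * m ≤ (s.length : Int)) :
    ∀ (k : Int) (r : List Int), 1 ≤ k → k ≤ m → pvGood s k.toNat r →
      (pvDouble m k r = none → ¬ pvRep s m.toNat) ∧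
      (∀ k' r', pvDouble m k r = some (k', r') →
        1 ≤ k' ∧ k' ≤ m ∧ m ≤ 2 * k' ∧ pvGood s k'.toNat r') := by
  intro k r
  generalize hfuel : (m - k).toNat = fuel
  induction fuel using Nat.strong_induction_on generalizing k r with
  | _ fuel ih =>
      intro hk1 hkm hg
      rw [pvDouble]
      by_cases hcond : 1 ≤ k ∧ 2 * k ≤ m
      · rw [dif_pos hcond]
        by_cases hset : (PySem.Set.ofList r).length = r.length
        · rw [if_pos hset]
          constructor
          · intro _
            rintro ⟨i, j, hij, hjn, heq⟩
            have hnd : r.Nodup := pvNodup_of_setlen r hset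
            have hrlen := hg.1
            have hKM : k.toNat ≤ m.toNat := by omega
            have hilen : i < r.length := by omega
            have hjlen : j < r.length := by omega
            have hwk : pvWin s k.toNat i = pvWin s k.toNat j := by
              rw [pvWin_prefix s k.toNat m.toNat i hKM,
                  pvWin_prefix s k.toNat m.toNat j hKM, heq]
            have hr : r[i] = r[j] := (hg.2 i j hilen hjlen).mpr hwk
            have : i = j := (List.Nodup.getElem_inj_iff hnd (hi := hilen) (hj := hjlen)).mp hr
            omega
          · intro k' r' h; cases h
        · rw [if_neg hset]
          have hrlen := hg.1
          have hKr : k.toNat ≤ r.length := by omega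
          have hg' : pvGood s ((2 * k).toNat) (pvIntern (r.zip (r.drop k.toNat))) := by
            have := pvGood_step s k.toNat r (by omega) hKr hg
            rwa [show (2 * k).toNat = k.toNat + k.toNat by omega]
          exact ih ((m - 2 * k).toNat) (by omega) (2 * k)
            (pvIntern (r.zip (r.drop k.toNat))) rfl (by omega) (by omega) hg'
      · rw [dif_neg hcond]
        constructor
        · intro h; cases h
        · intro k' r' h
          injection h with h'
          cases h'
          exact ⟨hk1, hkm, by omega, hg⟩

-- ===== B-side: the final hash pass =====

def pvStep2 (d : PySem.Dict (Int × Int) Int) (p : Int × (Int × Int)) :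
    PySem.Dict (Int × Int) Int :=
  match d.get? p.2 with
  | some _ => d
  | none => d.insert p.2 p.1

-- the dict built by B's final loop stores, for key w, the index of the FIRST pair with key w
lemma pvGetBuild2 (ps : List (Int × (Int × Int))) (d : PySem.Dict (Int × Int) Int)
    (w : Int × Int) :
    ((ps.foldl pvStep2 d).get? w) = (d.get? w).or ((ps.find? (fun p => p.2 == w)).map (·.1)) := by
  induction ps generalizing d with
  | nil => simp
  | cons q rest ih =>
      simp only [List.foldl_cons, List.find?]
      by_cases hqw : q.2 = w
      · subst hqw
        simp only [beq_self_eq_true]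
        cases hgd : d.get? q.2 with
        | some v => simp [pvStep2, hgd, ih]
        | none =>
            simp only [pvStep2, hgd]
            rw [ih]
            simp [PySem.Dict.get?_insert_self]
      · have hbeq : (q.2 == w) = false := by simp [hqw]
        simp only [hbeq]
        cases hgd : d.get? q.2 with
        | some v => simp [pvStep2, hgd, ih]
        | none =>
            simp only [pvStep2, hgd]
            rw [ih]
            rw [PySem.Dict.get?_insert_of_ne _ _ (fun h => hqw h.symm)]

-- a list sorted by first component: find? returns a pair whose index is minimal among matches
lemma pvFind_min2 (p : Int × (Int × Int) → Bool) (ps : List (Int × (Int × Int)))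
    (hps : ps.Pairwise (fun a b => a.1 < b.1))
    (q : Int × (Int × Int)) (hq : q ∈ ps) (hpq : p q = true) :
    ∃ q0, ps.find? p = some q0 ∧ q0.1 ≤ q.1 := by
  induction ps with
  | nil => cases hq
  | cons a rest ih =>
      rw [List.pairwise_cons] at hps
      by_cases ha : p a = true
      · refine ⟨a, by simp [List.find?, ha], ?_⟩
        rcases List.mem_cons.mp hq with rfl | hmem
        · exact le_refl q.1
        · exact le_of_lt (hps.1 q hmem)
      · have hqa : q ≠ a := fun h => ha (h ▸ hpq)
        have hmem : q ∈ rest := by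
          rcases List.mem_cons.mp hq with rfl | h
          · exact absurd rfl hqa
          · exact h
        rcases ih hps.2 hmem with ⟨q0, hfind, hle⟩
        refine ⟨q0, ?_, hle⟩
        simpa [List.find?, ha] using hfind

-- main loop invariant for the final pass
lemma pvLoop_iff2 (m : Int) (hm : 1 ≤ m) (js ps : List (Int × (Int × Int)))
    (hasc : (ps ++ js).Pairwise (fun a b => a.1 < b.1)) :
    pvAltLoop m (ps.foldl pvStep2 PySem.Dict.empty) js = true
      ↔ ∃ q ∈ js, ∃ p ∈ ps ++ js, p.1 + m ≤ q.1 ∧ p.2 = q.2 := by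
  induction js generalizing ps with
  | nil => simp [pvAltLoop]
  | cons q rest ih =>
      obtain ⟨j, key⟩ := q
      have hpa := List.pairwise_append.mp hasc
      have hps : ps.Pairwise (fun a b => a.1 < b.1) := hpa.1
      have hjrest : ∀ b ∈ rest, j < b.1 := fun b hb => (List.pairwise_cons.mp hpa.2.1).1 b hb
      have hasc' : ((ps ++ [(j, key)]) ++ rest).Pairwise (fun a b => a.1 < b.1) := by
        rw [List.append_assoc, List.singleton_append]; exact hasc
      have hget : (ps.foldl pvStep2 PySem.Dict.empty).get? key
          = (ps.find? (fun p => p.2 == key)).map (·.1) := by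
        rw [pvGetBuild2]; simp
      have hfold : (ps ++ [(j, key)]).foldl pvStep2 PySem.Dict.empty
          = pvStep2 (ps.foldl pvStep2 PySem.Dict.empty) (j, key) := by
        rw [List.foldl_append]; rfl
      have hih := ih (ps ++ [(j, key)]) hasc'
      rw [hfold] at hih
      simp only [List.append_assoc, List.singleton_append] at hih
      -- if no repeat is detected at j, no valid pair targets j
      have hnopair : (∀ q0, ps.find? (fun p => p.2 == key) = some q0 → ¬ q0.1 + m ≤ j) →
          ¬ ∃ p ∈ ps ++ (j, key) :: rest, p.1 + m ≤ j ∧ p.2 = key := by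
        rintro hno ⟨p, hp, him, heqw⟩
        have hij : p.1 < j := by omega
        rcases List.mem_append.mp hp with hips | hijr
        · have hPp : (p.2 == key) = true := by simp [heqw]
          rcases pvFind_min2 (fun p => p.2 == key) ps hps p hips hPp with ⟨q0, hf, hle⟩
          exact hno q0 hf (by omega)
        · rcases List.mem_cons.mp hijr with rfl | hpr
          · simp at hij
          · exact absurd (hjrest p hpr) (by omega)
      have hDsome : ∀ (d : PySem.Dict (Int × Int) Int) i0, d.get? key = some i0 →
          pvStep2 d (j, key) = d := by
        intro d i0 h; unfold pvStep2; rw [h]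
      have hDnone : ∀ (d : PySem.Dict (Int × Int) Int), d.get? key = none →
          pvStep2 d (j, key) = d.insert key j := by
        intro d h; unfold pvStep2; rw [h]
      simp only [pvAltLoop]
      rw [hget]
      cases hfind : ps.find? (fun p => p.2 == key) with
      | some q0 =>
          simp only [Option.map_some]
          by_cases hi0j : m ≤ j - q0.1
          · rw [if_pos hi0j]
            have hq0ps : q0 ∈ ps := List.mem_of_find?_eq_some hfind
            have hPq0 := List.find?_some hfind
            simp only [beq_iff_eq] at hPq0
            constructor
            · intro _
              exact ⟨(j, key), List.mem_cons_self,
                q0, List.mem_append.mpr (Or.inl hq0ps), by omega, hPq0⟩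
            · intro _; rfl
          · rw [if_neg hi0j]
            rw [hDsome _ q0.1 (by rw [hget, hfind]; rfl)] at hih
            rw [hih]
            have hno := hnopair (by
              intro q1 hf1
              rw [hfind] at hf1
              injection hf1 with h1
              subst h1
              omega)
            constructor
            · rintro ⟨q', hq', p, hp, hC⟩
              exact ⟨q', List.mem_cons_of_mem _ hq', p, hp, hC⟩
            · rintro ⟨q', hq', p, hp, hC⟩
              rcases List.mem_cons.mp hq' with rfl | hq'r
              · exact absurd ⟨p, hp, hC⟩ hno
              · exact ⟨q', hq'r, p, hp, hC⟩
      | none =>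
          simp only [Option.map_none]
          rw [if_neg (by omega : ¬ m ≤ j - j)]
          rw [hDnone _ (by rw [hget, hfind]; rfl)] at hih
          rw [hih]
          have hno := hnopair (by
            intro q1 hf1
            rw [hfind] at hf1
            cases hf1)
          constructor
          · rintro ⟨q', hq', p, hp, hC⟩
            exact ⟨q', List.mem_cons_of_mem _ hq', p, hp, hC⟩
          · rintro ⟨q', hq', p, hp, hC⟩
            rcases List.mem_cons.mp hq' with rfl | hq'r
            · exact absurd ⟨p, hp, hC⟩ hno
            · exact ⟨q', hq'r, p, hp, hC⟩

-- keys built from a good rank array identify equal length-M windows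
lemma pvKeys_iff (s : List Int) (K M MK : Nat) (r : List Int) (hK1 : 1 ≤ K) (hKM : K ≤ M)
    (hM2K : M ≤ K + K) (hMK : MK = M - K) (hg : pvGood s K r) (i j : Nat)
    (hi : i < (r.zip (r.drop MK)).length) (hj : j < (r.zip (r.drop MK)).length) :
    (r.zip (r.drop MK))[i] = (r.zip (r.drop MK))[j] ↔ pvWin s M i = pvWin s M j := by
  subst hMK
  obtain ⟨hlen, hiff⟩ := hg
  have hzlen : (r.zip (r.drop (M - K))).length = r.length - (M - K) := by
    simp only [List.length_zip, List.length_drop]; omega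
  rw [hzlen] at hi hj
  rw [List.getElem_zip, List.getElem_zip, List.getElem_drop, List.getElem_drop, Prod.mk.injEq]
  rw [hiff i j (by omega) (by omega), hiff (M - K + i) (M - K + j) (by omega) (by omega)]
  rw [show M - K + i = i + (M - K) by omega, show M - K + j = j + (M - K) by omega]
  constructor
  · rintro ⟨h1, h2⟩
    exact pvGlue s K M i j hKM hM2K h1 h2
  · intro h
    have e : ∀ t : Nat, pvWin s K (t + (M - K)) = (pvWin s M t).drop (M - K) := by
      intro t
      simp [pvWin, List.drop_take, List.drop_drop, show M - (M - K) = K from by omega]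
    constructor
    · rw [pvWin_prefix s K M i hKM, pvWin_prefix s K M j hKM, h]
    · rw [e i, e j, h]

lemma pvB_iff (s : List Int) (m : Int) (hm : 1 ≤ m) :
    check_repeating_subsequences_py_alt s m = true ↔ pvRep s m.toNat := by
  unfold check_repeating_subsequences_py_alt
  rw [if_neg (by omega)]
  by_cases h2 : (s.length : Int) < 2 * m
  · rw [if_pos h2]
    constructor
    · intro h; cases h
    · rintro ⟨i, j, hij, hjn, -⟩
      omega
  rw [if_neg h2]
  have hspec := pvDouble_spec s m (by omega) 1 (pvIntern s) (by omega) hm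
    (by simpa using pvGood_base s)
  cases hdd : pvDouble m 1 (pvIntern s) with
  | none =>
      constructor
      · intro h; cases h
      · intro h; exact absurd h (hspec.1 hdd)
  | some kr =>
      obtain ⟨k, r⟩ := kr
      obtain ⟨hk1, hkm, hm2k, hg⟩ := hspec.2 k r hdd
      have hloop := pvLoop_iff2 m hm
        (PySem.List.enumerate (r.zip (r.drop (m - k).toNat)) 0) []
        (by simpa using PySem.List.pairwise_lt_enumerate (r.zip (r.drop (m - k).toNat)) 0)
      simp only [List.nil_append, List.foldl_nil] at hloop
      rw [hloop]
      set keys := r.zip (r.drop (m - k).toNat) with hkeys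
      have hzlen : keys.length = r.length - (m.toNat - k.toNat) := by
        simp only [hkeys, List.length_zip, List.length_drop]
        omega
      have hkey_iff : ∀ i j : Nat, ∀ (hi : i < keys.length) (hj : j < keys.length),
          (keys[i] = keys[j] ↔ pvWin s m.toNat i = pvWin s m.toNat j) := by
        intro i j hi hj
        exact pvKeys_iff s k.toNat m.toNat (m - k).toNat r (by omega) (by omega) (by omega)
          (by omega) hg i j hi hj
      constructor
      · rintro ⟨q, hq, p, hp, him, heqw⟩
        rw [PySem.List.mem_enumerate_iff] at hq hp
        obtain ⟨tq, htq, rfl⟩ := hq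
        obtain ⟨tp, htp, rfl⟩ := hp
        simp only [Int.zero_add] at him ⊢
        have hwin : pvWin s m.toNat tp = pvWin s m.toNat tq := by
          rw [← hkey_iff tp tq htp htq]
          simpa using heqw
        refine ⟨tp, tq, by omega, ?_, hwin⟩
        have := hg.1
        omega
      · rintro ⟨i, j, hij, hjn, heq⟩
        have hrlen := hg.1
        have hjk : j < keys.length := by omega
        have hik : i < keys.length := by omega
        refine ⟨((j : Int), keys[j]), ?_, ((i : Int), keys[i]), ?_, by omega, ?_⟩
        · rw [PySem.List.mem_enumerate_iff]
          exact ⟨j, hjk, by simp⟩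
        · rw [PySem.List.mem_enumerate_iff]
          exact ⟨i, hik, by simp⟩
        · simpa using (hkey_iff i j hik hjk).mpr heq

-- ===== VERDICT (by name: the statement is the Claim_ definition above) =====
theorem check_repeating_subsequences_py_spec : Claim_equal_check_repeating_subsequences_py := by
  intro s m _
  unfold Spec_check_repeating_subsequences_py
  by_cases hm : m ≤ 0
  · rw [pvA_trivial s m hm]
    unfold check_repeating_subsequences_py_alt
    rw [if_pos hm]
  · have hm1 : 1 ≤ m := by omega
    have := (pvA_iff s m hm1).trans (pvB_iff s m hm1).symm
    cases hA : check_repeating_subsequences_py s m <;>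
      cases hB : check_repeating_subsequences_py_alt s m <;>
      simp_all
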